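-- pv_equiv track=rewrite | github.com/darkhtk/ops-cure | nas_bridge/app/session_service.py | _normalize_task_payload_text
-- ===== SOURCE A (Python) =====
-- def _normalize_task_payload_text(text: str) -> str:
--     stripped = text.strip()
--     if not stripped:
--         return ""
--     lines = [line.strip() for line in stripped.splitlines() if line.strip()]
--     if any(
--         raw_line.startswith(prefix)
--         for raw_line in lines
--         for prefix in ("Target summary:", "Files:", "Done condition:")
--     ):
--         return stripped
--     if any(raw_line.startswith(("OPS:", "HUMAN:", "ANSWER:", "ISSUE:", "DONE:")) for raw_line in lines):
--         preferred: list[str] = []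
--         for prefix in ("ANSWER:", "HUMAN:"):
--             preferred.extend(
--                 raw_line[len(prefix) :].strip()
--                 for raw_line in lines
--                 if raw_line.startswith(prefix) and raw_line[len(prefix) :].strip()
--             )
--         issue_lines = [
--             raw_line[len("ISSUE:") :].strip()
--             for raw_line in lines
--             if raw_line.startswith("ISSUE:") and raw_line[len("ISSUE:") :].strip()
--         ]
--         preferred.extend(f"Issue: {item}" for item in issue_lines)
--         if preferred:
--             return "\n".join(preferred)
--         non_ops = [raw_line for raw_line in lines if not raw_line.startswith("OPS:")]
--         if non_ops:
--             return "\n".join(non_ops)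
--     return stripped
-- ===== SOURCE B (Python) =====
-- def _normalize_task_payload_text(text: str) -> str:
--     stripped = text.strip()
--     if not stripped:
--         return ""
--     summary = False
--     action = False
--     answers = []
--     humans = []
--     issues = []
--     non_ops = []
--     for raw in stripped.splitlines():
--         line = raw.strip()
--         if not line:
--             continue
--         if line.startswith(("Target summary:", "Files:", "Done condition:")):
--             summary = True
--         if line.startswith("OPS:"):
--             action = True
--             continue
--         non_ops.append(line)
--         if line.startswith("ANSWER:"):
--             action = True
--             rest = line[7:].strip()
--             if rest:
--                 answers.append(rest)
--         elif line.startswith("HUMAN:"):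
--             action = True
--             rest = line[6:].strip()
--             if rest:
--                 humans.append(rest)
--         elif line.startswith("ISSUE:"):
--             action = True
--             rest = line[6:].strip()
--             if rest:
--                 issues.append("Issue: " + rest)
--         elif line.startswith("DONE:"):
--             action = True
--     if summary:
--         return stripped
--     if action:
--         preferred = answers + humans + issues
--         if preferred:
--             return "\n".join(preferred)
--         if non_ops:
--             return "\n".join(non_ops)
--     return stripped
-- ===== Notes on version B (the rewrite author's own statement) =====
-- stated objective: alternative
-- what changed: Replaces A's six separate rescans of the line list (two any() scans, three filter/extract comprehensions, a non-OPS filter) with a single classification pass that buckets each stripped nonempty line (summary flag, action flag, ANSWER/HUMAN/ISSUE lists, non-OPS list) followed by one assembly step.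
import Mathlib
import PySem

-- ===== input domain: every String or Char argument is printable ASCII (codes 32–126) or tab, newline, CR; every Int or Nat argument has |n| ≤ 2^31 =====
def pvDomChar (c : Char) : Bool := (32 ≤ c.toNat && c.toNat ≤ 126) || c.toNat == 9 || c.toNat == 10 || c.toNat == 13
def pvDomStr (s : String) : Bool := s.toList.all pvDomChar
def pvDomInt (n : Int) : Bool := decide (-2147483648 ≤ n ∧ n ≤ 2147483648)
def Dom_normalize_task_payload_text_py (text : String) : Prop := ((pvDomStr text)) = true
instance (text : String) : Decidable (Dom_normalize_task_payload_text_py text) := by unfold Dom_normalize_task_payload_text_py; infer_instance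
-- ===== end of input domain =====

-- B replaces A's multiple rescans of the line list with a single classification pass
-- into buckets, then assembles the result; same return value (alternative decomposition).

-- rest of a line after dropping its first n characters, stripped (shared by both ports:
-- line[len(prefix):].strip() in A, line[7:].strip() etc. in B)
def pvRest (n : Int) (l : String) : String :=
  PySem.Str.strip (PySem.Str.slice l (some n) none)

-- ===== PORT A =====
def normalize_task_payload_text_py (text : String) : String :=
  let stripped := PySem.Str.strip text
  if stripped = "" then "" else
  let lines := ((PySem.Str.splitlines stripped).filter
      (fun line => PySem.Str.strip line ≠ "")).map PySem.Str.strip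
  if lines.any (fun raw_line =>
      ["Target summary:", "Files:", "Done condition:"].any
        (fun prefix_ => PySem.Str.startswith raw_line prefix_)) then
    stripped
  else if lines.any (fun raw_line =>
      PySem.Str.startswith raw_line "OPS:" || PySem.Str.startswith raw_line "HUMAN:" ||
      PySem.Str.startswith raw_line "ANSWER:" || PySem.Str.startswith raw_line "ISSUE:" ||
      PySem.Str.startswith raw_line "DONE:") then
    let preferred : List String :=
      (["ANSWER:", "HUMAN:"].map (fun prefix_ =>
        (lines.filter (fun raw_line =>
            PySem.Str.startswith raw_line prefix_ &&
            pvRest (PySem.Str.len prefix_) raw_line ≠ "")).map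
          (fun raw_line => pvRest (PySem.Str.len prefix_) raw_line))).flatten
    let issue_lines : List String :=
      (lines.filter (fun raw_line =>
          PySem.Str.startswith raw_line "ISSUE:" &&
          pvRest (PySem.Str.len "ISSUE:") raw_line ≠ "")).map
        (fun raw_line => pvRest (PySem.Str.len "ISSUE:") raw_line)
    let preferred := preferred ++ issue_lines.map (fun item => "Issue: " ++ item)
    if preferred ≠ [] then
      PySem.Str.join "\n" preferred
    else
      let non_ops := lines.filter (fun raw_line => ¬ PySem.Str.startswith raw_line "OPS:")
      if non_ops ≠ [] then PySem.Str.join "\n" non_ops else stripped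
  else stripped

-- ===== PORT B =====
-- state: (summary flag, action flag, answers, humans, issues, non_ops)
def pvStep (st : Bool × Bool × List String × List String × List String × List String)
    (raw : String) : Bool × Bool × List String × List String × List String × List String :=
  let line := PySem.Str.strip raw
  if line = "" then st else
  let (summary, action, answers, humans, issues, non_ops) := st
  let summary := summary || PySem.Str.startswith line "Target summary:" ||
      PySem.Str.startswith line "Files:" || PySem.Str.startswith line "Done condition:"
  if PySem.Str.startswith line "OPS:" then
    (summary, true, answers, humans, issues, non_ops)
  else
    let non_ops := non_ops ++ [line]
    if PySem.Str.startswith line "ANSWER:" then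
      let rest := pvRest 7 line
      (summary, true, if rest = "" then answers else answers ++ [rest], humans, issues, non_ops)
    else if PySem.Str.startswith line "HUMAN:" then
      let rest := pvRest 6 line
      (summary, true, answers, if rest = "" then humans else humans ++ [rest], issues, non_ops)
    else if PySem.Str.startswith line "ISSUE:" then
      let rest := pvRest 6 line
      (summary, true, answers, humans,
        if rest = "" then issues else issues ++ ["Issue: " ++ rest], non_ops)
    else
      (summary, action || PySem.Str.startswith line "DONE:", answers, humans, issues, non_ops)

def normalize_task_payload_text_py_alt (text : String) : String :=
  let stripped := PySem.Str.strip text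
  if stripped = "" then "" else
  let st := (PySem.Str.splitlines stripped).foldl pvStep (false, false, [], [], [], [])
  let (summary, action, answers, humans, issues, non_ops) := st
  if summary then stripped
  else if action then
    let preferred := answers ++ humans ++ issues
    if preferred ≠ [] then PySem.Str.join "\n" preferred
    else if non_ops ≠ [] then PySem.Str.join "\n" non_ops
    else stripped
  else stripped

-- ===== PRECONDITION & SPEC =====
def Spec_normalize_task_payload_text_py (text : String) (out : String) : Prop := out = normalize_task_payload_text_py_alt text
instance (text : String) (out : String) : Decidable (Spec_normalize_task_payload_text_py text out) := by unfold Spec_normalize_task_payload_text_py; infer_instance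

-- ===== CLAIM (what is proved, stated in full; the proofs are below) =====
def Claim_equal_normalize_task_payload_text_py : Prop := ∀ (text : String), Dom_normalize_task_payload_text_py text → Spec_normalize_task_payload_text_py text (normalize_task_payload_text_py text)

-- ===== LEMMAS AND PROOFS =====

-- processed lines: stripped nonempty lines, as A computes them
def pvLines (rs : List String) : List String :=
  ((rs.filter (fun line => PySem.Str.strip line ≠ "")).map PySem.Str.strip)

def pvSumP (l : String) : Bool :=
  PySem.Str.startswith l "Target summary:" ||
    (PySem.Str.startswith l "Files:" || PySem.Str.startswith l "Done condition:")

def pvActP (l : String) : Bool :=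
  PySem.Str.startswith l "OPS:" || PySem.Str.startswith l "HUMAN:" ||
    PySem.Str.startswith l "ANSWER:" || PySem.Str.startswith l "ISSUE:" ||
    PySem.Str.startswith l "DONE:"

-- per-line contributions to the four buckets
def pvAnsC (l : String) : List String :=
  if PySem.Str.startswith l "ANSWER:" && pvRest 7 l ≠ "" then [pvRest 7 l] else []

def pvHumC (l : String) : List String :=
  if PySem.Str.startswith l "HUMAN:" && pvRest 6 l ≠ "" then [pvRest 6 l] else []

def pvIssC (l : String) : List String :=
  if PySem.Str.startswith l "ISSUE:" && pvRest 6 l ≠ "" then ["Issue: " ++ pvRest 6 l] else []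

def pvNopC (l : String) : List String :=
  if ¬ PySem.Str.startswith l "OPS:" then [l] else []

def pvAnsL (ls : List String) : List String :=
  (ls.filter (fun l => PySem.Str.startswith l "ANSWER:" && pvRest 7 l ≠ "")).map
    (fun l => pvRest 7 l)

def pvHumL (ls : List String) : List String :=
  (ls.filter (fun l => PySem.Str.startswith l "HUMAN:" && pvRest 6 l ≠ "")).map
    (fun l => pvRest 6 l)

def pvIssL (ls : List String) : List String :=
  (ls.filter (fun l => PySem.Str.startswith l "ISSUE:" && pvRest 6 l ≠ "")).map
    (fun l => "Issue: " ++ pvRest 6 l)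

def pvNopL (ls : List String) : List String :=
  ls.filter (fun l => ¬ PySem.Str.startswith l "OPS:")

-- two incomparable prefixes cannot both be prefixes of the same line
lemma pvExcl (p q : String) {l : String} (hpq : ¬ p.toList <+: q.toList)
    (hqp : ¬ q.toList <+: p.toList)
    (hp : PySem.Str.startswith l p = true) : PySem.Str.startswith l q = false := by
  by_contra h
  rw [Bool.not_eq_false] at h
  rw [PySem.Str.startswith_eq, PySem.Chars.startswith_iff] at hp h
  rcases List.prefix_or_prefix_of_prefix hp h with h' | h'
  · exact hpq h'
  · exact hqp h'

lemma pvAnsL_cons (l : String) (L : List String) : pvAnsL (l :: L) = pvAnsC l ++ pvAnsL L := by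
  simp only [pvAnsL, pvAnsC, List.filter_cons]
  split <;> simp

lemma pvHumL_cons (l : String) (L : List String) : pvHumL (l :: L) = pvHumC l ++ pvHumL L := by
  simp only [pvHumL, pvHumC, List.filter_cons]
  split <;> simp

lemma pvIssL_cons (l : String) (L : List String) : pvIssL (l :: L) = pvIssC l ++ pvIssL L := by
  simp only [pvIssL, pvIssC, List.filter_cons]
  split <;> simp

lemma pvNopL_cons (l : String) (L : List String) : pvNopL (l :: L) = pvNopC l ++ pvNopL L := by
  simp only [pvNopL, pvNopC, List.filter_cons]
  split <;> simp_all

lemma pvStep_cons (r : String) (h0 : ¬ PySem.Str.strip r = "") (s a : Bool)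
    (ans hum iss nop : List String) :
    pvStep (s, a, ans, hum, iss, nop) r =
      (s || pvSumP (PySem.Str.strip r), a || pvActP (PySem.Str.strip r),
        ans ++ pvAnsC (PySem.Str.strip r), hum ++ pvHumC (PySem.Str.strip r),
        iss ++ pvIssC (PySem.Str.strip r), nop ++ pvNopC (PySem.Str.strip r)) := by
  by_cases hops : PySem.Str.startswith (PySem.Str.strip r) "OPS:" = true
  · have hans := pvExcl "OPS:" "ANSWER:" (by decide) (by decide) hops
    have hhum := pvExcl "OPS:" "HUMAN:" (by decide) (by decide) hops
    have hiss := pvExcl "OPS:" "ISSUE:" (by decide) (by decide) hops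
    simp_all [pvStep, pvSumP, pvActP, pvAnsC, pvHumC, pvIssC, pvNopC, Bool.or_assoc]
  · by_cases hans : PySem.Str.startswith (PySem.Str.strip r) "ANSWER:" = true
    · have hhum := pvExcl "ANSWER:" "HUMAN:" (by decide) (by decide) hans
      have hiss := pvExcl "ANSWER:" "ISSUE:" (by decide) (by decide) hans
      by_cases hrest : pvRest 7 (PySem.Str.strip r) = "" <;>
        simp_all [pvStep, pvSumP, pvActP, pvAnsC, pvHumC, pvIssC, pvNopC, Bool.or_assoc]
    · by_cases hhum : PySem.Str.startswith (PySem.Str.strip r) "HUMAN:" = true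
      · have hiss := pvExcl "HUMAN:" "ISSUE:" (by decide) (by decide) hhum
        by_cases hrest : pvRest 6 (PySem.Str.strip r) = "" <;>
          simp_all [pvStep, pvSumP, pvActP, pvAnsC, pvHumC, pvIssC, pvNopC, Bool.or_assoc]
      · by_cases hiss : PySem.Str.startswith (PySem.Str.strip r) "ISSUE:" = true
        · by_cases hrest : pvRest 6 (PySem.Str.strip r) = "" <;>
            simp_all [pvStep, pvSumP, pvActP, pvAnsC, pvHumC, pvIssC, pvNopC, Bool.or_assoc]
        · simp_all [pvStep, pvSumP, pvActP, pvAnsC, pvHumC, pvIssC, pvNopC, Bool.or_assoc]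

lemma pvFold (rs : List String) (s a : Bool) (ans hum iss nop : List String) :
    rs.foldl pvStep (s, a, ans, hum, iss, nop) =
      (s || (pvLines rs).any pvSumP, a || (pvLines rs).any pvActP,
        ans ++ pvAnsL (pvLines rs), hum ++ pvHumL (pvLines rs),
        iss ++ pvIssL (pvLines rs), nop ++ pvNopL (pvLines rs)) := by
  induction rs generalizing s a ans hum iss nop with
  | nil => simp [pvLines, pvAnsL, pvHumL, pvIssL, pvNopL]
  | cons r rs ih =>
    by_cases h0 : PySem.Str.strip r = ""
    · have hl : pvLines (r :: rs) = pvLines rs := by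
        simp [pvLines, List.filter_cons, h0]
      rw [List.foldl_cons, show pvStep (s, a, ans, hum, iss, nop) r = (s, a, ans, hum, iss, nop)
        from by simp [pvStep, h0], ih, hl]
    · have hl : pvLines (r :: rs) = PySem.Str.strip r :: pvLines rs := by
        simp [pvLines, List.filter_cons, h0]
      rw [List.foldl_cons, pvStep_cons r h0, ih, hl]
      simp only [List.any_cons, pvAnsL_cons, pvHumL_cons, pvIssL_cons, pvNopL_cons,
        Bool.or_assoc, List.append_assoc]

lemma pvLenAns : PySem.Str.len "ANSWER:" = 7 := by decide
lemma pvLenHum : PySem.Str.len "HUMAN:" = 6 := by decide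
lemma pvLenIss : PySem.Str.len "ISSUE:" = 6 := by decide

-- A's result, written with the named pieces
lemma pvA_eq (text : String) :
    normalize_task_payload_text_py text =
      (if PySem.Str.strip text = "" then "" else
        if (pvLines (PySem.Str.splitlines (PySem.Str.strip text))).any pvSumP then
          PySem.Str.strip text
        else if (pvLines (PySem.Str.splitlines (PySem.Str.strip text))).any pvActP then
          if (pvAnsL (pvLines (PySem.Str.splitlines (PySem.Str.strip text))) ++
              pvHumL (pvLines (PySem.Str.splitlines (PySem.Str.strip text))) ++
              pvIssL (pvLines (PySem.Str.splitlines (PySem.Str.strip text)))) ≠ [] then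
            PySem.Str.join "\n"
              (pvAnsL (pvLines (PySem.Str.splitlines (PySem.Str.strip text))) ++
                pvHumL (pvLines (PySem.Str.splitlines (PySem.Str.strip text))) ++
                pvIssL (pvLines (PySem.Str.splitlines (PySem.Str.strip text))))
          else if pvNopL (pvLines (PySem.Str.splitlines (PySem.Str.strip text))) ≠ [] then
            PySem.Str.join "\n" (pvNopL (pvLines (PySem.Str.splitlines (PySem.Str.strip text))))
          else PySem.Str.strip text
        else PySem.Str.strip text) := by
  unfold normalize_task_payload_text_py pvLines pvSumP pvActP pvAnsL pvHumL pvIssL pvNopL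
  simp only [pvLenAns, pvLenHum, pvLenIss, List.map_cons, List.map_nil, List.flatten_cons,
    List.flatten_nil, List.append_nil, List.any_cons, List.any_nil, Bool.or_false,
    List.map_map, Function.comp_def]

-- B's result, written with the same pieces
lemma pvB_eq (text : String) :
    normalize_task_payload_text_py_alt text =
      (if PySem.Str.strip text = "" then "" else
        if (pvLines (PySem.Str.splitlines (PySem.Str.strip text))).any pvSumP then
          PySem.Str.strip text
        else if (pvLines (PySem.Str.splitlines (PySem.Str.strip text))).any pvActP then
          if (pvAnsL (pvLines (PySem.Str.splitlines (PySem.Str.strip text))) ++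
              pvHumL (pvLines (PySem.Str.splitlines (PySem.Str.strip text))) ++
              pvIssL (pvLines (PySem.Str.splitlines (PySem.Str.strip text)))) ≠ [] then
            PySem.Str.join "\n"
              (pvAnsL (pvLines (PySem.Str.splitlines (PySem.Str.strip text))) ++
                pvHumL (pvLines (PySem.Str.splitlines (PySem.Str.strip text))) ++
                pvIssL (pvLines (PySem.Str.splitlines (PySem.Str.strip text))))
          else if pvNopL (pvLines (PySem.Str.splitlines (PySem.Str.strip text))) ≠ [] then
            PySem.Str.join "\n" (pvNopL (pvLines (PySem.Str.splitlines (PySem.Str.strip text))))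
          else PySem.Str.strip text
        else PySem.Str.strip text) := by
  unfold normalize_task_payload_text_py_alt
  simp only [pvFold, Bool.false_or, List.nil_append]

-- ===== VERDICT (by name: the statement is the Claim_ definition above) =====
theorem normalize_task_payload_text_py_spec : Claim_equal_normalize_task_payload_text_py := by
  intro text _
  unfold Spec_normalize_task_payload_text_py
  rw [pvA_eq, pvB_eq]
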